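-- pv_equiv track=rewrite | github.com/gauraviitp/Python | SortingBankAccounts.py | solve
-- ===== SOURCE A (Python) =====
-- def solve(li):
--     n = len(li)
--     li.sort()
--
--     i = 0
--     while i < n:
--         count = 1
--         while i + 1 < n and li[i] == li[i + 1]:
--             i += 1
--             count += 1
--         yield [li[i], str(count)]
--         i += 1
-- ===== SOURCE B (Python) =====
-- def solve(li):
--     li.sort()
--     c = {}
--     for v in li:
--         c[v] = c.get(v, 0) + 1
--     for v, k in c.items():
--         yield [v, str(k)]
-- ===== Notes on version B (the rewrite author's own statement) =====
-- stated objective: idiomatic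
-- what changed: A scans the sorted list with nested index while-loops counting runs of consecutive duplicates; B builds a frequency dictionary in one pass over the sorted list and yields its items, so the inner run-scan disappears.
import Mathlib
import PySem

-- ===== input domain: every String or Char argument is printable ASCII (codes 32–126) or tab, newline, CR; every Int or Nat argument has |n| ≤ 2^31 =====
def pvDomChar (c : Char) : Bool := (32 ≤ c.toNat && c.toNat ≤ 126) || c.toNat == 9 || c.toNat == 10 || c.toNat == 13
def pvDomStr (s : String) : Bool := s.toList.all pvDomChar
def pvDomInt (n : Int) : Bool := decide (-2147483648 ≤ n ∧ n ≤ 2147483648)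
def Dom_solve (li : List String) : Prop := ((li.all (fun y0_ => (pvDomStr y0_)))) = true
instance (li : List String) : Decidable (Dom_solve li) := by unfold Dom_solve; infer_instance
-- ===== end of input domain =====

-- B replaces A's consecutive-duplicate run scan by a one-pass frequency dictionary (idiomatic).
-- Both A and B sort the argument list in place (same side effect); the theorems are about the return value.

-- ===== PORT A =====
-- inner while loop: 'while i + 1 < n and li[i] == li[i + 1]: i += 1; count += 1'
def solveInner (s : List String) (n : Nat) (i : Nat) (count : Nat) : Nat × Nat :=
  if h : i + 1 < n ∧ PySem.List.pyGet? s (i : Int) = PySem.List.pyGet? s ((i : Int) + 1) then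
    solveInner s n (i + 1) (count + 1)
  else (i, count)
  termination_by n - i
  decreasing_by omega

-- outer while loop; fuel = n bounds the number of iterations (i grows by ≥ 1 each pass, so it never runs out)
def solveOuter (s : List String) (n : Nat) (i : Nat) (fuel : Nat) : List (List String) :=
  match fuel with
  | 0 => []
  | f + 1 =>
    if i < n then
      let p := solveInner s n i 1
      [(PySem.List.pyGet? s (p.1 : Int)).getD "", PySem.Int.toStr (p.2 : Int)] :: solveOuter s n (p.1 + 1) f
    else []

def solve (li : List String) : List (List String) :=
  let n := li.length
  let s := PySem.List.sorted li (fun x => x)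
  solveOuter s n 0 n

-- ===== PORT B =====
def solve_alt (li : List String) : List (List String) :=
  let s := PySem.List.sorted li (fun x => x)
  let c := s.foldl (fun d v => d.insert v (d.getD v 0 + 1)) PySem.Dict.empty
  c.items.map (fun p => [p.1, PySem.Int.toStr p.2])

-- ===== PRECONDITION & SPEC =====
def Spec_solve (li : List String) (out : List (List String)) : Prop := out = solve_alt li
instance (li : List String) (out : List (List String)) : Decidable (Spec_solve li out) := by unfold Spec_solve; infer_instance

-- ===== CLAIM (what is proved, stated in full; the proofs are below) =====
def Claim_equal_solve : Prop := ∀ (li : List String), Dom_solve li → Spec_solve li (solve li)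

-- ===== LEMMAS AND PROOFS =====

-- canonical run-length grouping of a list (proof-side bridge between the two ports)
def canon : List String → List (List String)
  | [] => []
  | x :: t =>
    [x, PySem.Int.toStr (((t.takeWhile (· == x)).length : Int) + 1)] :: canon (t.dropWhile (· == x))
  termination_by s => s.length
  decreasing_by simpa using Nat.lt_succ_of_le (List.length_dropWhile_le _ _)

theorem drop_length_takeWhile (t : List String) (p : String → Bool) :
    t.drop (t.takeWhile p).length = t.dropWhile p := by
  induction t with
  | nil => rfl
  | cons a t ih =>
    by_cases hp : p a
    · rw [List.takeWhile_cons_of_pos hp, List.dropWhile_cons_of_pos hp]; simpa using ih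
    · rw [List.takeWhile_cons_of_neg (by simp [hp]), List.dropWhile_cons_of_neg (by simp [hp])]
      rfl

theorem solveInner_spec (t : List String) : ∀ (x : String) (s : List String) (i c : Nat),
    s.drop i = x :: t →
    solveInner s s.length i c =
      (i + (t.takeWhile (· == x)).length, c + (t.takeWhile (· == x)).length) ∧
    PySem.List.pyGet? s ((i + (t.takeWhile (· == x)).length : Nat) : Int) = some x := by
  induction t with
  | nil =>
    intro x s i c h
    have hlen : s.length - i = 1 := by
      have := congrArg List.length h; simpa using this
    have hgi : s[i]? = some x := by
      have : (s.drop i)[0]? = some x := by rw [h]; rfl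
      simpa using this
    rw [solveInner, dif_neg (fun hc => absurd hc.1 (by omega))]
    refine ⟨by simp, ?_⟩
    simpa using hgi
  | cons y t' ih =>
    intro x s i c h
    have hd1 : s.drop (i + 1) = y :: t' := by
      have h2 : List.drop 1 (s.drop i) = List.drop (i + 1) s := by
        rw [List.drop_drop]
      rw [h] at h2; exact h2.symm ▸ rfl
    have hi1 : i + 1 < s.length := by
      have := congrArg List.length h; simp [List.length_drop] at this; omega
    have hgi : s[i]? = some x := by
      have : (s.drop i)[0]? = some x := by rw [h]; rfl
      simpa using this
    have hgi1 : s[i + 1]? = some y := by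
      have : (s.drop (i + 1))[0]? = some y := by rw [hd1]; rfl
      simpa using this
    by_cases hxy : x = y
    · subst hxy
      have hcond : PySem.List.pyGet? s (i : Int) = PySem.List.pyGet? s ((i : Int) + 1) := by
        have h1 : ((i : Int) + 1) = ((i + 1 : Nat) : Int) := by push_cast; ring
        rw [h1, PySem.List.pyGet?_natCast, PySem.List.pyGet?_natCast, hgi, hgi1]
      rw [solveInner, dif_pos ⟨hi1, hcond⟩]
      obtain ⟨h1, h2⟩ := ih x s (i + 1) (c + 1) hd1
      have htw : (List.takeWhile (· == x) (x :: t')).length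
          = (List.takeWhile (· == x) t').length + 1 := by
        rw [List.takeWhile_cons_of_pos (by simp)]; rfl
      constructor
      · rw [h1, htw, Prod.mk.injEq]; omega
      · rw [htw]; convert h2 using 3; omega
    · have hcond : ¬(i + 1 < s.length ∧
          PySem.List.pyGet? s (i : Int) = PySem.List.pyGet? s ((i : Int) + 1)) := by
        intro hc
        have h1 : ((i : Int) + 1) = ((i + 1 : Nat) : Int) := by push_cast; ring
        rw [h1, PySem.List.pyGet?_natCast, PySem.List.pyGet?_natCast, hgi, hgi1] at hc
        exact hxy (by simpa using hc.2)
      rw [solveInner, dif_neg hcond]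
      have htw : List.takeWhile (· == x) (y :: t') = [] := by
        rw [List.takeWhile_cons_of_neg]
        simpa using fun hyx => hxy hyx.symm
      rw [htw]
      refine ⟨by simp, by simpa using hgi⟩

theorem solveOuter_spec (fuel : Nat) : ∀ (s : List String) (i : Nat),
    s.length - i ≤ fuel → solveOuter s s.length i fuel = canon (s.drop i) := by
  induction fuel with
  | zero =>
    intro s i h
    have hnil : s.drop i = [] := List.drop_eq_nil_iff.mpr (by omega)
    rw [hnil, solveOuter, canon]
  | succ f ih =>
    intro s i h
    by_cases hi : i < s.length
    · cases hd : s.drop i with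
      | nil =>
        have := congrArg List.length hd; simp [List.length_drop] at this; omega
      | cons x t =>
        obtain ⟨h1, h2⟩ := solveInner_spec t x s i 1 hd
        have hdt : s.drop (i + 1) = t := by
          have h3 : List.drop 1 (s.drop i) = List.drop (i + 1) s := by
            rw [List.drop_drop]
          rw [hd] at h3; exact h3.symm ▸ rfl
        have hdk : s.drop (i + (List.takeWhile (· == x) t).length + 1)
            = t.dropWhile (· == x) := by
          have h4 : i + (List.takeWhile (· == x) t).length + 1
              = (i + 1) + (List.takeWhile (· == x) t).length := by omega
          rw [h4, ← List.drop_drop, hdt, drop_length_takeWhile]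
        rw [solveOuter, if_pos hi]
        simp only [h1]
        rw [canon]
        have hcnt : PySem.Int.toStr ((1 + (List.takeWhile (· == x) t).length : Nat) : Int)
            = PySem.Int.toStr (((List.takeWhile (· == x) t).length : Int) + 1) := by
          congr 1; push_cast; ring
        rw [h2]
        simp only [Option.getD_some, hcnt]
        rw [ih s (i + (List.takeWhile (· == x) t).length + 1) (by omega), hdk]
    · have hnil : s.drop i = [] := List.drop_eq_nil_iff.mpr (by omega)
      rw [hnil, solveOuter, if_neg hi, canon]

theorem discard_ofList_of_not_mem (x : String) (r : List String) (hx : x ∉ r) :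
    PySem.Set.discard (PySem.Set.ofList r) x = PySem.Set.ofList r := by
  unfold PySem.Set.discard
  refine List.filter_eq_self.mpr (fun y hy => ?_)
  have : y ∈ r := (PySem.Set.mem_ofList r y).mp hy
  simpa using fun h : y = x => hx (h ▸ this)

theorem ofList_run (x : String) (r : List String) (hxr : x ∉ r) :
    ∀ (tw : List String), (∀ v ∈ tw, v = x) →
    PySem.Set.ofList (x :: (tw ++ r)) = x :: PySem.Set.ofList r := by
  intro tw
  induction tw with
  | nil =>
    intro _
    rw [List.nil_append, PySem.Set.ofList_cons, discard_ofList_of_not_mem x r hxr]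
  | cons a tw' ih =>
    intro hall
    have ha : a = x := hall a (by simp)
    subst ha
    rw [List.cons_append, PySem.Set.ofList_cons, ih (fun v hv => hall v (by simp [hv]))]
    unfold PySem.Set.discard
    rw [List.filter_cons_of_neg (by simp)]
    exact congrArg _ (List.filter_eq_self.mpr (fun y hy => by
      have hyr : y ∈ r := (PySem.Set.mem_ofList r y).mp hy
      simpa using fun h : y = a => hxr (h ▸ hyr)))
  
theorem canon_sorted (m : Nat) : ∀ (s : List String), s.length ≤ m →
    s.Pairwise (· ≤ ·) →
    canon s = (PySem.Set.ofList s).map (fun v => [v, PySem.Int.toStr (s.count v : Int)]) := by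
  induction m with
  | zero =>
    intro s h _
    have hs : s = [] := List.eq_nil_of_length_eq_zero (by omega)
    subst hs; rw [canon]; rfl
  | succ m ih =>
    intro s hle hp
    cases s with
    | nil => rw [canon]; rfl
    | cons x t =>
      have htwr : t.takeWhile (· == x) ++ t.dropWhile (· == x) = t :=
        List.takeWhile_append_dropWhile
      have htw_all : ∀ v ∈ t.takeWhile (· == x), v = x :=
        fun v hv => eq_of_beq (List.mem_takeWhile_imp (p := (· == x)) hv)
      have hxt : ∀ v ∈ t, x ≤ v := (List.pairwise_cons.mp hp).1
      have hpt : t.Pairwise (· ≤ ·) := (List.pairwise_cons.mp hp).2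
      have hpr : (t.dropWhile (· == x)).Pairwise (· ≤ ·) :=
        hpt.sublist (List.dropWhile_sublist _)
      have hxr : ∀ v ∈ t.dropWhile (· == x), x < v := by
        cases hr : t.dropWhile (· == x) with
        | nil => simp
        | cons h0 r' =>
          have hne : t.dropWhile (· == x) ≠ [] := by rw [hr]; simp
          have hh0 : ¬(h0 = x) := by
            have h5 := List.head_dropWhile_not (· == x) hne
            have h6 : (t.dropWhile (· == x)).head hne = h0 := by simp [hr]
            rw [h6] at h5
            simpa using h5
          have hmem : ∀ v ∈ h0 :: r', v ∈ t := by
            rw [← hr]; exact fun v hv => (List.dropWhile_sublist _).mem hv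
          have hxh0 : x < h0 :=
            lt_of_le_of_ne (hxt h0 (hmem h0 (by simp))) (fun he => hh0 he.symm)
          intro v hv
          rcases List.mem_cons.mp hv with h | h
          · exact h ▸ hxh0
          · have : h0 ≤ v := by
              have := hpr; rw [hr] at this
              exact (List.pairwise_cons.mp this).1 v h
            exact lt_of_lt_of_le hxh0 this
      have hxnr : x ∉ t.dropWhile (· == x) := fun hm => lt_irrefl x (hxr x hm)
      have hset : PySem.Set.ofList (x :: t) = x :: PySem.Set.ofList (t.dropWhile (· == x)) := by
        conv_lhs => rw [← htwr]
        exact ofList_run x _ hxnr _ htw_all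
      have hsplit : ∀ v : String, t.count v
          = (t.takeWhile (· == x)).count v + (t.dropWhile (· == x)).count v := by
        intro v
        conv_lhs => rw [← htwr]
        exact List.count_append ..
      have hcx : (x :: t).count x = (t.takeWhile (· == x)).length + 1 := by
        rw [List.count_cons_self, hsplit]
        have h1 : (t.takeWhile (· == x)).count x = (t.takeWhile (· == x)).length :=
          List.count_eq_length.mpr (fun b hb => (htw_all b hb).symm)
        have h2 : (t.dropWhile (· == x)).count x = 0 := List.count_eq_zero.mpr hxnr
        omega
      have hcv : ∀ v ∈ PySem.Set.ofList (t.dropWhile (· == x)),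
          (x :: t).count v = (t.dropWhile (· == x)).count v := by
        intro v hv
        have hvr : v ∈ t.dropWhile (· == x) := (PySem.Set.mem_ofList _ v).mp hv
        have hvx : ¬(x = v) := fun he => lt_irrefl x (he ▸ hxr v hvr)
        have h0 : (t.takeWhile (· == x)).count v = 0 :=
          List.count_eq_zero.mpr (fun hm => hvx (htw_all v hm).symm)
        rw [List.count_cons, hsplit, h0]
        simp [beq_iff_eq, hvx]
      have hrlen : (t.dropWhile (· == x)).length ≤ m := by
        have h1 := List.length_dropWhile_le (· == x) t
        simp at hle; omega
      rw [canon, ih _ hrlen hpr, hset, List.map_cons]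
      congr 1
      · have : ((List.takeWhile (· == x) t).length : Int) + 1
            = (((x :: t).count x : Nat) : Int) := by rw [hcx]; push_cast; ring
        rw [this]
      · exact (List.map_congr_left (fun v hv => by rw [hcv v hv])).symm

-- ===== VERDICT (by name: the statement is the Claim_ definition above) =====
theorem solve_spec : Claim_equal_solve := by
  intro li _
  show solve li = solve_alt li
  simp only [solve, solve_alt]
  have hlen : (PySem.List.sorted li (fun x => x)).length = li.length :=
    PySem.List.length_sorted li _ _
  rw [PySem.Dict.foldl_insert_getD_add_one_eq_counter, PySem.Dict.items_counter]
  rw [← hlen, solveOuter_spec _ _ 0 (by omega), List.drop_zero]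
  rw [canon_sorted (PySem.List.sorted li (fun x => x)).length _ le_rfl
    (by simpa using PySem.List.sorted_pairwise li (fun x => x))]
  simp [List.map_map, Function.comp]
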